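-- pv_equiv track=rewrite | github.com/YunYue1029/data_cmd | RDP/pipe/commands/filter.py | _find_operator_outside_parens
-- ===== SOURCE A (Python) =====
-- def _find_operator_outside_parens(expr: str, op: str) -> int | None:
--     """Find operator position, not inside quotes or parentheses."""
--     in_string = False
--     string_char = None
--     depth = 0
--
--     for i in range(len(expr) - len(op) + 1):
--         char = expr[i]
--
--         if char in ('"', "'") and (i == 0 or expr[i-1] != '\\'):
--             if not in_string:
--                 in_string = True
--                 string_char = char
--             elif char == string_char:
--                 in_string = False
--                 string_char = None
--
--         if not in_string:
--             if char == "(":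
--                 depth += 1
--             elif char == ")":
--                 depth -= 1
--
--         if not in_string and depth == 0 and expr[i:i+len(op)] == op:
--             # Check it's not part of a longer operator
--             if op == "=" and i > 0 and expr[i-1] in ("!", ">", "<"):
--                 continue
--             if op == "=" and i + 1 < len(expr) and expr[i+1] == "=":
--                 continue
--             return i
--
--     return None
-- ===== SOURCE B (Python) =====
-- def _find_operator_outside_parens(expr: str, op: str) -> int | None:
--     """Find operator position, not inside quotes or parentheses.
--
--     Two-pass version: first build a mask of positions that are outside any
--     string literal and at paren depth 0, then jump between occurrences of
--     op with str.find and return the first occurrence the mask admits.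
--     """
--     outside = []
--     in_string = False
--     string_char = None
--     depth = 0
--     for i, char in enumerate(expr):
--         if char in ('"', "'") and (i == 0 or expr[i - 1] != '\\'):
--             if not in_string:
--                 in_string = True
--                 string_char = char
--             elif char == string_char:
--                 in_string = False
--                 string_char = None
--         if not in_string:
--             if char == "(":
--                 depth += 1
--             elif char == ")":
--                 depth -= 1
--         outside.append(not in_string and depth == 0)
--     outside.append(not in_string and depth == 0)  # state after the last character
--
--     n = len(expr)
--     i = expr.find(op, 0)
--     while i != -1:
--         if outside[i] and not (op == "=" and ((i > 0 and expr[i - 1] in "!><")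
--                                               or (i + 1 < n and expr[i + 1] == "="))):
--             return i
--         i = expr.find(op, i + 1)
--     return None
-- ===== Notes on version B (the rewrite author's own statement) =====
-- stated objective: alternative
-- what changed: Single stateful scan with an inline candidate test is replaced by two passes: one scan builds a boolean outside-of-string/depth-0 mask, then the search jumps between occurrences of op via str.find and returns the first occurrence the mask (and the '=' adjacency checks) admits.
-- outside the precondition, e.g. on _find_operator_outside_parens('ab', ''): A returns 0, B returns 0; on _find_operator_outside_parens('(', ''): A raises IndexError, B returns None
import Mathlib
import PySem

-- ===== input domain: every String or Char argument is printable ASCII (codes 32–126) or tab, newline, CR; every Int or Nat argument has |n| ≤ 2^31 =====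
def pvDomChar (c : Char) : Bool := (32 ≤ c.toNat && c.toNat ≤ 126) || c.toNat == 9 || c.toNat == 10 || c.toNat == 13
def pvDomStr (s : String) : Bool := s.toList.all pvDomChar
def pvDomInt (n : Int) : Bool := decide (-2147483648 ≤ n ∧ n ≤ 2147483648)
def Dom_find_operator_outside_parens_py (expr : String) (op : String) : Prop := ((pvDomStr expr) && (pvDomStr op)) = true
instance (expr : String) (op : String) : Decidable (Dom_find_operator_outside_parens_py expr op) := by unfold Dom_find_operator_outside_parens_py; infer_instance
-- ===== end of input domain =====

-- B replaces A's single stateful scan by two passes: a scan building an outside-of-string/depth-0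
-- mask, then a search that jumps between occurrences of op via str.find; same cost, alternative shape.

-- ===== PORT A =====
-- A-side loop over i ∈ range(len(expr)-len(op)+1) carrying (in_string, string_char, depth);
-- fuel = number of remaining indices.  expr[i]/expr[i-1]/expr[i+1] are ported as List.getD:
-- under Pre_ (op ≠ "") every such access A performs is in bounds, so getD is exact there.
-- expr[i:i+len(op)] == op is ported as (s.drop i).take o.length == o (exact for these bounds).
def pvA_loop (s o : List Char) : Nat → Nat → Bool → Option Char → Int → Option Int
  | 0, _, _, _, _ => none
  | k+1, i, inStr, sc, depth =>
    let c := s.getD i ' '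
    let st1 :=
      if (c == '"' || c == '\'') && (i == 0 || !(s.getD (i-1) ' ' == '\\')) then
        if !inStr then (true, some c)
        else if some c == sc then (false, (none : Option Char))
        else (inStr, sc)
      else (inStr, sc)
    let depth1 :=
      if !st1.1 then
        if c == '(' then depth + 1
        else if c == ')' then depth - 1
        else depth
      else depth
    if !st1.1 && depth1 == 0 && ((s.drop i).take o.length == o) then
      if o == ['='] && decide (0 < i) && (s.getD (i-1) ' ' == '!' || s.getD (i-1) ' ' == '>' || s.getD (i-1) ' ' == '<') then
        pvA_loop s o k (i+1) st1.1 st1.2 depth1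
      else if o == ['='] && decide (i+1 < s.length) && (s.getD (i+1) ' ' == '=') then
        pvA_loop s o k (i+1) st1.1 st1.2 depth1
      else some (i : Int)
    else pvA_loop s o k (i+1) st1.1 st1.2 depth1

def find_operator_outside_parens_py (expr : String) (op : String) : Option Int :=
  pvA_loop expr.toList op.toList (expr.toList.length + 1 - op.toList.length) 0 false none 0

-- ===== PORT B =====
-- B-side: expr.find(op, j) = least j' ≥ j (j' ≤ len) where op occurs, else -1; fuel = len+1-j
-- positions left to try, so the j ≤ len bound of Python's find is enforced by the fuel.
def pvB_findFrom (s o : List Char) : Nat → Nat → Int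
  | 0, _ => -1
  | f+1, j => if (s.drop j).take o.length == o then (j : Int) else pvB_findFrom s o f (j+1)

-- pass 1: the mask `outside` (one entry per character, plus the state after the last one)
def pvB_states (s : List Char) : List Bool :=
  let r := (PySem.List.enumerate s).foldl
    (fun (acc : List Bool × Bool × Option Char × Int) (p : Int × Char) =>
      let st1 :=
        if (p.2 == '"' || p.2 == '\'') && (p.1 == 0 || !(s.getD ((p.1 - 1).toNat) ' ' == '\\')) then
          if !acc.2.1 then (true, some p.2)
          else if some p.2 == acc.2.2.1 then (false, (none : Option Char))
          else (acc.2.1, acc.2.2.1)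
        else (acc.2.1, acc.2.2.1)
      let d1 :=
        if !st1.1 then
          if p.2 == '(' then acc.2.2.2 + 1
          else if p.2 == ')' then acc.2.2.2 - 1
          else acc.2.2.2
        else acc.2.2.2
      (acc.1 ++ [!st1.1 && d1 == 0], st1.1, st1.2, d1))
    ([], false, none, 0)
  r.1 ++ [!r.2.1 && r.2.2.2 == 0]

-- pass 2: the while loop over find-occurrences; outside[i] ported as getD (always in bounds:
-- find only yields i ≤ len and the mask has len+1 entries)
def pvB_loop (s o : List Char) (outside : List Bool) : Nat → Int → Option Int
  | 0, _ => none
  | f+1, i =>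
    if i == -1 then none
    else
      let j := i.toNat
      if outside.getD j false &&
         !(o == ['='] &&
            ((decide (0 < j) && (s.getD (j-1) ' ' == '!' || s.getD (j-1) ' ' == '>' || s.getD (j-1) ' ' == '<')) ||
             (decide (j+1 < s.length) && (s.getD (j+1) ' ' == '=')))) then
        some (j : Int)
      else pvB_loop s o outside f (pvB_findFrom s o (s.length - j) (j+1))

def find_operator_outside_parens_py_alt (expr : String) (op : String) : Option Int :=
  let s := expr.toList
  let o := op.toList
  let outside := pvB_states s
  pvB_loop s o outside (s.length + 2) (pvB_findFrom s o (s.length + 1) 0)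

-- ===== PRECONDITION & SPEC =====
-- Pre_ excludes only op = "": there A eventually evaluates expr[len(expr)] and raises IndexError
-- whenever no earlier position qualifies (e.g. expr = "(" or expr = ""); when an earlier position
-- qualifies A's accidental return value 0 coincides with B's.
def Pre_find_operator_outside_parens_py (expr : String) (op : String) : Prop := op ≠ ""
instance (expr : String) (op : String) : Decidable (Pre_find_operator_outside_parens_py expr op) := by
  unfold Pre_find_operator_outside_parens_py; infer_instance

def pvWitness_find_operator_outside_parens_py : String × String := ("a + (b = c)", "=")

def Spec_find_operator_outside_parens_py (expr : String) (op : String) (out : Option Int) : Prop :=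
  out = find_operator_outside_parens_py_alt expr op
instance (expr : String) (op : String) (out : Option Int) : Decidable (Spec_find_operator_outside_parens_py expr op out) := by
  unfold Spec_find_operator_outside_parens_py; infer_instance

-- ===== CLAIM (what is proved, stated in full; the proofs are below) =====
def Claim_equal_find_operator_outside_parens_py : Prop :=
  ∀ (expr : String) (op : String), Dom_find_operator_outside_parens_py expr op →
    Pre_find_operator_outside_parens_py expr op →
    Spec_find_operator_outside_parens_py expr op (find_operator_outside_parens_py expr op)

-- ===== LEMMAS AND PROOFS =====

-- the shared per-character state step (proof-side characterisation of both ports' updates)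
def pvStepC (s : List Char) (inStr : Bool) (sc : Option Char) (depth : Int) (i : Nat) (c : Char) :
    Bool × Option Char × Int :=
  let st1 :=
    if (c == '"' || c == '\'') && (i == 0 || !(s.getD (i-1) ' ' == '\\')) then
      if !inStr then (true, some c)
      else if some c == sc then (false, (none : Option Char))
      else (inStr, sc)
    else (inStr, sc)
  let d1 :=
    if !st1.1 then
      if c == '(' then depth + 1
      else if c == ')' then depth - 1
      else depth
    else depth
  (st1.1, st1.2, d1)

-- state (in_string, string_char, depth) before index i
def pvState (s : List Char) : Nat → Bool × Option Char × Int
  | 0 => (false, none, 0)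
  | i+1 => let st := pvState s i; pvStepC s st.1 st.2.1 st.2.2 i (s.getD i ' ')

def pvOutAt (s : List Char) (i : Nat) : Bool :=
  !(pvState s (i+1)).1 && (pvState s (i+1)).2.2 == 0

theorem pvA_loop_succ (s o : List Char) (k i : Nat) (inStr : Bool) (sc : Option Char) (depth : Int) :
    pvA_loop s o (k+1) i inStr sc depth =
      (let st := pvStepC s inStr sc depth i (s.getD i ' ')
       if !st.1 && st.2.2 == 0 && ((s.drop i).take o.length == o) then
         if o == ['='] && decide (0 < i) && (s.getD (i-1) ' ' == '!' || s.getD (i-1) ' ' == '>' || s.getD (i-1) ' ' == '<') then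
           pvA_loop s o k (i+1) st.1 st.2.1 st.2.2
         else if o == ['='] && decide (i+1 < s.length) && (s.getD (i+1) ' ' == '=') then
           pvA_loop s o k (i+1) st.1 st.2.1 st.2.2
         else some (i : Int)
       else pvA_loop s o k (i+1) st.1 st.2.1 st.2.2) := rfl

-- scan/final-state characterisation of the foldl in pvB_states
def pvScan (s : List Char) : Bool → Option Char → Int → List (Int × Char) → List Bool
  | _, _, _, [] => []
  | b, sc, d, (ii, c) :: r =>
    let st := pvStepC s b sc d ii.toNat c
    (!st.1 && st.2.2 == 0) :: pvScan s st.1 st.2.1 st.2.2 r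

def pvFin (s : List Char) : Bool → Option Char → Int → List (Int × Char) → Bool × Option Char × Int
  | b, sc, d, [] => (b, sc, d)
  | b, sc, d, (ii, c) :: r =>
    let st := pvStepC s b sc d ii.toNat c
    pvFin s st.1 st.2.1 st.2.2 r

theorem pvFold_spec (s : List Char) (l : List (Int × Char)) (hnn : ∀ p ∈ l, 0 ≤ p.1) :
    ∀ (acc : List Bool) (b : Bool) (sc : Option Char) (d : Int),
    l.foldl
      (fun (acc : List Bool × Bool × Option Char × Int) (p : Int × Char) =>
        let st1 :=
          if (p.2 == '"' || p.2 == '\'') && (p.1 == 0 || !(s.getD ((p.1 - 1).toNat) ' ' == '\\')) then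
            if !acc.2.1 then (true, some p.2)
            else if some p.2 == acc.2.2.1 then (false, (none : Option Char))
            else (acc.2.1, acc.2.2.1)
          else (acc.2.1, acc.2.2.1)
        let d1 :=
          if !st1.1 then
            if p.2 == '(' then acc.2.2.2 + 1
            else if p.2 == ')' then acc.2.2.2 - 1
            else acc.2.2.2
          else acc.2.2.2
        (acc.1 ++ [!st1.1 && d1 == 0], st1.1, st1.2, d1)) (acc, b, sc, d)
    = (acc ++ pvScan s b sc d l, pvFin s b sc d l) := by
  induction l with
  | nil => intro acc b sc d; simp [pvScan, pvFin]
  | cons p r ih =>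
    intro acc b sc d
    obtain ⟨ii, c⟩ := p
    have hnn0 : (0:Int) ≤ ii := hnn (ii, c) (List.mem_cons_self ..)
    have hi0 : (ii == (0:Int)) = (ii.toNat == 0) := by
      cases h : (ii == (0:Int)) <;> cases h2 : (ii.toNat == 0) <;> simp_all <;> omega
    have him1 : (ii - 1).toNat = ii.toNat - 1 := by omega
    simp only [List.foldl_cons, pvScan, pvFin, pvStepC, hi0, him1]
    rw [ih (fun p hp => hnn p (List.mem_cons_of_mem _ hp))]
    simp

theorem pvDrop_cons {s t : List Char} {j : Nat} {c : Char} (h : s.drop j = c :: t) :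
    s.getD j ' ' = c ∧ s.drop (j+1) = t := by
  have h0 : s[j]? = some c := by
    have h1 : (s.drop j)[0]? = s[j + 0]? := List.getElem?_drop ..
    rw [h] at h1
    simpa using h1.symm
  constructor
  · simp [List.getD_eq_getElem?_getD, h0]
  · have h2 : (s.drop j).drop 1 = t := by rw [h]; simp
    rw [List.drop_drop] at h2
    simpa [Nat.add_comm] using h2

theorem pvScan_enum (s : List Char) :
    ∀ (t : List Char) (j : Nat), s.drop j = t →
    pvScan s (pvState s j).1 (pvState s j).2.1 (pvState s j).2.2 (PySem.List.enumerate t j) =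
      (List.range' j t.length).map (pvOutAt s) := by
  intro t
  induction t with
  | nil => intro j _; simp [PySem.List.enumerate, pvScan]
  | cons c r ih =>
    intro j hdrop
    obtain ⟨hc, hdrop'⟩ := pvDrop_cons hdrop
    have hstep : pvStepC s (pvState s j).1 (pvState s j).2.1 (pvState s j).2.2 j c = pvState s (j+1) := by
      rw [← hc]; rfl
    rw [PySem.List.enumerate_cons]
    simp only [pvScan, Int.toNat_natCast, hstep]
    have : ((j:Int) + 1) = ((j+1 : Nat) : Int) := by push_cast; ring
    rw [this, ih (j+1) hdrop']
    simp [List.range'_succ, pvOutAt]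

theorem pvStates_eq (s : List Char) :
    pvB_states s = (List.range' 0 s.length).map (pvOutAt s) ++ [!(pvState s s.length).1 && (pvState s s.length).2.2 == 0] := by
  have hnn : ∀ p ∈ PySem.List.enumerate s 0, (0:Int) ≤ p.1 := by
    intro p hp
    rw [PySem.List.mem_enumerate_iff] at hp
    obtain ⟨k, hk, rfl⟩ := hp
    simp
  have hfin : ∀ (t : List Char) (j : Nat), s.drop j = t →
      pvFin s (pvState s j).1 (pvState s j).2.1 (pvState s j).2.2 (PySem.List.enumerate t j) = pvState s (j + t.length) := by
    intro t
    induction t with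
    | nil => intro j _; simp [PySem.List.enumerate, pvFin]
    | cons c r ih =>
      intro j hdrop
      obtain ⟨hc, hdrop'⟩ := pvDrop_cons hdrop
      have hstep : pvStepC s (pvState s j).1 (pvState s j).2.1 (pvState s j).2.2 j c = pvState s (j+1) := by
        rw [← hc]; rfl
      rw [PySem.List.enumerate_cons]
      simp only [pvFin, Int.toNat_natCast, hstep]
      have : ((j:Int) + 1) = ((j+1 : Nat) : Int) := by push_cast; ring
      rw [this, ih (j+1) hdrop']
      congr 1
      simp
      omega
  unfold pvB_states
  rw [pvFold_spec s _ hnn [] false none 0]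
  have h1 := pvScan_enum s s 0 (by simp)
  have h2 := hfin s 0 (by simp)
  simp only [pvState, Nat.cast_zero, Nat.zero_add] at h1 h2
  rw [h1, h2]
  simp

theorem pvMask (s : List Char) (i : Nat) (hi : i < s.length) :
    (pvB_states s).getD i false = pvOutAt s i := by
  rw [pvStates_eq]
  rw [List.getD_eq_getElem?_getD, List.getElem?_append_left (by simpa using hi)]
  simp [hi]

theorem pvFind_none (s o : List Char) (ho : o ≠ []) :
    ∀ (f j : Nat), s.length < j + o.length → pvB_findFrom s o f j = -1 := by
  intro f
  induction f with
  | zero => intro j _; rfl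
  | succ f ih =>
    intro j hj
    have hne : ((s.drop j).take o.length == o) = false := by
      rw [beq_eq_false_iff_ne]
      intro heq
      have hlen := congrArg List.length heq
      simp at hlen
      have : 0 < o.length := List.length_pos_iff.mpr ho
      omega
    simp only [pvB_findFrom, hne, Bool.false_eq_true, if_false]
    exact ih (j+1) (by omega)

theorem pvMain (s o : List Char) (ho : o ≠ []) :
    ∀ (k i K : Nat), i + k = s.length + 1 - o.length → k + 2 ≤ K →
    pvA_loop s o k i (pvState s i).1 (pvState s i).2.1 (pvState s i).2.2 =
      pvB_loop s o (pvB_states s) K (pvB_findFrom s o (s.length + 1 - i) i) := by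
  have hm : 0 < o.length := List.length_pos_iff.mpr ho
  intro k
  induction k with
  | zero =>
    intro i K hik hK
    have hfind : pvB_findFrom s o (s.length + 1 - i) i = -1 := by
      apply pvFind_none s o ho
      omega
    obtain ⟨K', rfl⟩ : ∃ K', K = K' + 1 := ⟨K - 1, by omega⟩
    rw [hfind]
    rfl
  | succ k ih =>
    intro i K hik hK
    have hi : i < s.length := by omega
    have hfuel : s.length + 1 - i = (s.length - i) + 1 := by omega
    rw [pvA_loop_succ, hfuel]
    have hstep : pvStepC s (pvState s i).1 (pvState s i).2.1 (pvState s i).2.2 i (s.getD i ' ') = pvState s (i+1) := rfl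
    simp only [hstep]
    by_cases hsl : ((s.drop i).take o.length == o) = true
    · -- find stops at i
      have hfind : pvB_findFrom s o ((s.length - i) + 1) i = (i : Int) := by
        simp [pvB_findFrom, hsl]
      rw [hfind]
      obtain ⟨K', rfl⟩ : ∃ K', K = K' + 1 := ⟨K - 1, by omega⟩
      have hIH : pvA_loop s o k (i+1) (pvState s (i+1)).1 (pvState s (i+1)).2.1 (pvState s (i+1)).2.2 =
          pvB_loop s o (pvB_states s) K' (pvB_findFrom s o (s.length + 1 - (i+1)) (i+1)) := by
        apply ih (i+1) K' (by omega) (by omega)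
      have hBstep : pvB_loop s o (pvB_states s) (K'+1) (i : Int) =
          (if (pvB_states s).getD i false &&
             !(o == ['='] &&
                ((decide (0 < i) && (s.getD (i-1) ' ' == '!' || s.getD (i-1) ' ' == '>' || s.getD (i-1) ' ' == '<')) ||
                 (decide (i+1 < s.length) && (s.getD (i+1) ' ' == '=')))) then
            some (i : Int)
          else pvB_loop s o (pvB_states s) K' (pvB_findFrom s o (s.length - i) (i+1))) := by
        have hne : ((i : Int) == -1) = false := by
          simp [beq_eq_false_iff_ne]
        simp [pvB_loop, hne]
      rw [hBstep]
      have hmask : (pvB_states s).getD i false = (!(pvState s (i+1)).1 && (pvState s (i+1)).2.2 == 0) :=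
        pvMask s i hi
      have hfuel2 : s.length + 1 - (i+1) = s.length - i := by omega
      rw [hfuel2] at hIH
      rw [hmask]
      simp only [hsl, Bool.and_true]
      clear hstep hfind hBstep hmask hsl ho hm hik hK ih
      cases hout : (!(pvState s (i+1)).1 && (pvState s (i+1)).2.2 == 0) <;>
      cases hE : (o == ['=']) <;>
      cases hP : (decide (0 < i) && (s.getD (i-1) ' ' == '!' || s.getD (i-1) ' ' == '>' || s.getD (i-1) ' ' == '<')) <;>
      cases hQ : (decide (i+1 < s.length) && (s.getD (i+1) ' ' == '=')) <;>
      simp only [hout, hE, hP, hQ, Bool.true_and, Bool.false_and, Bool.and_true, Bool.and_false,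
        Bool.or_true, Bool.or_false, Bool.true_or, Bool.false_or, Bool.not_true, Bool.not_false,
        Bool.false_eq_true, Bool.true_eq_false, if_true, if_false] <;>
      first | exact hIH | rfl
    · -- no match at i: find skips, A recurses
      have hfind : pvB_findFrom s o ((s.length - i) + 1) i = pvB_findFrom s o (s.length - i) (i+1) := by
        simp [pvB_findFrom, hsl]
      rw [hfind]
      have hfuel2 : s.length + 1 - (i+1) = s.length - i := by omega
      have hIH := ih (i+1) K (by omega) (by omega)
      rw [hfuel2] at hIH
      have hsl' : ((s.drop i).take o.length == o) = false := by simpa using hsl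
      simp only [hsl', Bool.and_false, Bool.false_eq_true, if_false]
      exact hIH

-- ===== VERDICT (by name: the statement is the Claim_ definition above) =====
theorem find_operator_outside_parens_py_spec : Claim_equal_find_operator_outside_parens_py := by
  intro expr op _ hpre
  unfold Spec_find_operator_outside_parens_py
  unfold find_operator_outside_parens_py find_operator_outside_parens_py_alt
  have ho : op.toList ≠ [] := fun h => hpre (String.toList_eq_nil_iff.mp h)
  have := pvMain expr.toList op.toList ho (expr.toList.length + 1 - op.toList.length) 0 (expr.toList.length + 2)
    (by simp) (by have := List.length_pos_iff.mpr ho; omega)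
  simpa [pvState] using this
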